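-- pv_equiv track=rewrite | github.com/tianjon/prism-skills | skills/prism-dongchedi-scraper/scripts/run_brand_pipeline.py | build_param_batches
-- ===== SOURCE A (Python) =====
-- def build_param_batches(total: int, batch_size: int) -> list[tuple[int, int]]:
--     if total <= 0:
--         return []
--     if batch_size <= 0:
--         return [(0, total)]
--     batches = []
--     for offset in range(0, total, batch_size):
--         size = min(batch_size, total - offset)
--         batches.append((offset, size))
--     return batches
-- ===== SOURCE B (Python) =====
-- def build_param_batches(total: int, batch_size: int) -> list[tuple[int, int]]:
--     if total <= 0:
--         return []
--     if batch_size <= 0: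
--         return [(0, total)]
--     batches = []
--     t = total
--     while t > 0:
--         tail = t % batch_size
--         if tail == 0:
--             tail = batch_size
--         t -= tail
--         batches.append((t, tail))
--     batches.reverse()
--     return batches
-- ===== Notes on version B (the rewrite author's own statement) =====
-- stated objective: alternative
-- what changed: B builds the batch list back-to-front: a while loop repeatedly peels the final (possibly short) batch off the remaining total using a modulus, then reverses the collected list, instead of A's forward strided range() loop with a per-iteration min().
import Mathlib
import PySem

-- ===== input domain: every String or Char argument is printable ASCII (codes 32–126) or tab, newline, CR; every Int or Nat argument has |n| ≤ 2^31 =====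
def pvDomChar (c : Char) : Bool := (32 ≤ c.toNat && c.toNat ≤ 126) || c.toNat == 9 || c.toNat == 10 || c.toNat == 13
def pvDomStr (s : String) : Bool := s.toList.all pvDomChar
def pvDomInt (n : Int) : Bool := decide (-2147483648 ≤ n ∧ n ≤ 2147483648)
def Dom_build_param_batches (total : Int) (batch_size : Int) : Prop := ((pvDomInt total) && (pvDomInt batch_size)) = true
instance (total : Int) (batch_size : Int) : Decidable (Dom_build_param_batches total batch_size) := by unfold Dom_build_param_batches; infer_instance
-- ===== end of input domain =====

-- B builds the batch list back-to-front, peeling the final (possibly short) batch off the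
-- remaining total with a modulus and reversing at the end, instead of A's forward strided
-- range loop with min(); alternative structure, same cost.

-- ===== PORT A =====
def build_param_batches (total : Int) (batch_size : Int) : List (Int × Int) :=
  if total ≤ 0 then []
  else if batch_size ≤ 0 then [(0, total)]
  else
    (PySem.List.pyRange 0 total batch_size).foldl
      (fun batches offset => batches ++ [(offset, min batch_size (total - offset))]) []

-- ===== PORT B =====
-- the 0 < bs conjunct only makes the recursion total; B's loop is entered only with
-- batch_size > 0, where it is vacuous (Python's `while t > 0`)
def pvAltLoop (bs : Int) (t : Int) (acc : List (Int × Int)) : List (Int × Int) :=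
  if h : 0 < t ∧ 0 < bs then
    let r := PySem.Int.mod t bs
    let tail := if r = 0 then bs else r
    pvAltLoop bs (t - tail) (acc ++ [(t - tail, tail)])
  else acc
termination_by t.toNat
decreasing_by
  have hb := h.2
  have hts := h.1
  have hr : PySem.Int.mod t bs = t % bs := PySem.Int.mod_eq_emod_of_pos hb
  have h0 : 0 ≤ t % bs := Int.emod_nonneg t (by omega)
  have h1 : t % bs < bs := Int.emod_lt_of_pos t hb
  have hdm := Int.emod_add_ediv t bs
  have hq : 0 ≤ t / bs := Int.ediv_nonneg (by omega) (by omega)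
  rw [hr]
  split_ifs with hz
  · -- tail = bs; bs divides t and t > 0, so bs ≤ t
    have hq1 : 1 ≤ t / bs := by nlinarith
    have : bs ≤ t := by nlinarith
    omega
  · omega

def build_param_batches_alt (total : Int) (batch_size : Int) : List (Int × Int) :=
  if total ≤ 0 then []
  else if batch_size ≤ 0 then [(0, total)]
  else (pvAltLoop batch_size total []).reverse

-- ===== PRECONDITION & SPEC =====
def Spec_build_param_batches (total : Int) (batch_size : Int) (out : List (Int × Int)) : Prop := out = build_param_batches_alt total batch_size
instance (total : Int) (batch_size : Int) (out : List (Int × Int)) : Decidable (Spec_build_param_batches total batch_size out) := by unfold Spec_build_param_batches; infer_instance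

-- ===== CLAIM (what is proved, stated in full; the proofs are below) =====
def Claim_equal_build_param_batches : Prop := ∀ (total : Int) (batch_size : Int), Dom_build_param_batches total batch_size → Spec_build_param_batches total batch_size (build_param_batches total batch_size)

-- ===== LEMMAS AND PROOFS =====

-- common closed form both programs are reduced to (for 0 < total, 0 < bs)
def pvClosed (total bs : Int) : List (Int × Int) :=
  (List.range (total / bs).toNat).map (fun (i : Nat) => ((i : Int) * bs, bs)) ++
    (if 0 < total % bs then [(total / bs * bs, total % bs)] else [])

theorem pv_foldl_append_map (f : Int → Int × Int) :
    ∀ (l : List Int) (acc : List (Int × Int)),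
      l.foldl (fun a x => a ++ [f x]) acc = acc ++ l.map f := by
  intro l
  induction l with
  | nil => simp
  | cons x xs ih => intro acc; simp [List.foldl, ih]

-- ceiling count of range(0, total, bs) expressed via quotient and remainder
theorem pv_ceil_count (total bs : Int) (hb : 0 < bs) (ht : 0 < total) :
    (total - 0 + bs - 1) / bs = total / bs + (if 0 < total % bs then 1 else 0) := by
  have hdm := Int.emod_add_ediv total bs
  have hr0 : 0 ≤ total % bs := Int.emod_nonneg total (by omega)
  have hrb : total % bs < bs := Int.emod_lt_of_pos total hb
  set q := total / bs with hq
  set r := total % bs with hr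
  by_cases h : 0 < r
  · have : total - 0 + bs - 1 = (r - 1) + (q + 1) * bs := by ring_nf; omega
    rw [this, Int.add_mul_ediv_right _ _ (by omega : bs ≠ 0),
        Int.ediv_eq_zero_of_lt (by omega) (by omega)]
    simp [h]
  · have : total - 0 + bs - 1 = (bs - 1) + q * bs := by ring_nf; omega
    rw [this, Int.add_mul_ediv_right _ _ (by omega : bs ≠ 0),
        Int.ediv_eq_zero_of_lt (by omega) (by omega)]
    simp [h]

-- A's forward foldl over range(0, total, bs) equals the closed form
theorem build_param_batches_eq_closed (total bs : Int) (ht : 0 < total) (hb : 0 < bs) :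
    build_param_batches total bs = pvClosed total bs := by
  unfold build_param_batches pvClosed
  simp only [not_le.mpr ht, not_le.mpr hb, if_false]
  rw [PySem.List.pyRange_of_pos _ _ hb, if_pos (by omega : (0:Int) < total),
      pv_foldl_append_map, List.nil_append, List.map_map,
      pv_ceil_count total bs hb ht]
  simp only [Function.comp_def, zero_add]
  have hdm := Int.emod_add_ediv total bs
  have hr0 : 0 ≤ total % bs := Int.emod_nonneg total (by omega)
  have hrb : total % bs < bs := Int.emod_lt_of_pos total hb
  have hq0 : 0 ≤ total / bs := Int.ediv_nonneg (by omega) (by omega)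
  have huni : ∀ k ∈ List.range (total / bs).toNat,
      (bs * (k : Int), min bs (total - bs * (k : Int))) = (((k : Int)) * bs, bs) := by
    intro k hk
    have hk' : (k : Int) < total / bs := by
      have := List.mem_range.mp hk; omega
    have hge : bs ≤ total - bs * (k : Int) := by
      nlinarith [mul_le_mul_of_nonneg_right
        (show (k : Int) + 1 ≤ total / bs by omega) (le_of_lt hb)]
    rw [min_eq_left hge, mul_comm]
  by_cases hrp : 0 < total % bs
  · rw [if_pos hrp, if_pos hrp]
    have hsucc : (total / bs + 1).toNat = (total / bs).toNat + 1 := by omega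
    rw [hsucc, List.range_succ, List.map_append]
    congr 1
    · exact List.map_congr_left huni
    · have hc : (((total / bs).toNat : Int)) = total / bs := by omega
      have hmin : min bs (total - bs * (total / bs)) = total % bs := by
        rw [min_eq_right (by linarith)]
        linarith
      simp [hc, hmin, mul_comm]
  · rw [if_neg hrp, if_neg hrp, add_zero, List.append_nil]
    exact List.map_congr_left huni

-- B's loop on an exact multiple n*bs peels n uniform batches, back-to-front
theorem pvAltLoop_mul (bs : Int) (hb : 0 < bs) :
    ∀ (n : Nat) (acc : List (Int × Int)),
      pvAltLoop bs ((n : Int) * bs) acc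
        = acc ++ ((List.range n).map (fun (i : Nat) => ((i : Int) * bs, bs))).reverse := by
  intro n
  induction n with
  | zero => intro acc; rw [pvAltLoop]; simp
  | succ n ih =>
    intro acc
    rw [pvAltLoop]
    have ht : (0 : Int) < ((n : Int) + 1) * bs := by positivity
    have hmod : PySem.Int.mod (((n : Nat) + 1 : Nat) * bs) bs = 0 := by
      rw [PySem.Int.mod_eq_emod_of_pos hb]
      push_cast
      simp
    rw [dif_pos ⟨by push_cast; exact ht, hb⟩]
    simp only [hmod, reduceIte]
    have hsub : ((n : Nat) + 1 : Nat) * bs - bs = (n : Int) * bs := by push_cast; ring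
    rw [hsub, ih]
    rw [List.range_succ, List.map_append, List.reverse_append]
    simp

-- B's loop from total equals the closed form after the final reverse
theorem build_param_batches_alt_eq_closed (total bs : Int) (ht : 0 < total) (hb : 0 < bs) :
    build_param_batches_alt total bs = pvClosed total bs := by
  unfold build_param_batches_alt pvClosed
  simp only [not_le.mpr ht, not_le.mpr hb, if_false]
  have hdm := Int.emod_add_ediv total bs
  have hr0 : 0 ≤ total % bs := Int.emod_nonneg total (by omega)
  have hrb : total % bs < bs := Int.emod_lt_of_pos total hb
  have hq0 : 0 ≤ total / bs := Int.ediv_nonneg (by omega) (by omega)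
  have hcast : (((total / bs).toNat : Int)) = total / bs := by omega
  by_cases hrp : 0 < total % bs
  · -- first iteration peels the short tail, then an exact multiple remains
    rw [pvAltLoop, dif_pos ⟨ht, hb⟩]
    have hmod : PySem.Int.mod total bs = total % bs := PySem.Int.mod_eq_emod_of_pos hb
    simp only [hmod, if_neg (show ¬ total % bs = 0 by omega)]
    have hsub : total - total % bs = ((total / bs).toNat : Int) * bs := by
      rw [hcast]; linarith [hdm]
    rw [hsub, pvAltLoop_mul bs hb, List.nil_append, List.reverse_append,
        List.reverse_reverse, if_pos hrp, hcast]
    simp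
  · -- total is an exact multiple of bs
    have htot : total = ((total / bs).toNat : Int) * bs := by
      rw [hcast]; linarith [hdm]
    rw [show pvAltLoop bs total [] = pvAltLoop bs (((total / bs).toNat : Int) * bs) []
          from by rw [← htot],
        pvAltLoop_mul bs hb, List.nil_append, List.reverse_reverse,
        if_neg hrp, List.append_nil]

theorem build_param_batches_eq (total bs : Int) :
    build_param_batches total bs = build_param_batches_alt total bs := by
  by_cases ht : total ≤ 0
  · simp [build_param_batches, build_param_batches_alt, ht]
  by_cases hbs : bs ≤ 0
  · simp [build_param_batches, build_param_batches_alt, ht, hbs]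
  rw [build_param_batches_eq_closed total bs (by omega) (by omega),
      build_param_batches_alt_eq_closed total bs (by omega) (by omega)]

-- ===== VERDICT (by name: the statement is the Claim_ definition above) =====
theorem build_param_batches_spec : Claim_equal_build_param_batches := by
  intro total bs _
  exact build_param_batches_eq total bs
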